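-- pv_equiv track=rewrite | github.com/JeangyuHeo/Algorithm | 동적계획법(DP)/프로그래머스_카운트다운.py | solution
-- ===== SOURCE A (Python) =====
-- def solution(target):
--     candi = [i for i in range(1, 21)]
--     cost = {}
--
--     def dp(n):
--         if n == 0:
--             return (0, 0)
--         if n in cost:
--             return cost[n]
--
--         arr = []
--
--         if n-50 >= 0:
--             turn, cnt = dp(n-50)
--             arr.append((turn+1, cnt+1))
--
--         for num in candi:
--             if n - num >= 0:
--                 turn, cnt = dp(n-num)
--                 arr.append((turn+1, cnt+1))
--             if n - (2 * num) >= 0: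
--                 turn, cnt = dp(n - (2 * num))
--                 arr.append((turn+1, cnt))
--             if n - (3 * num) >= 0:
--                 turn, cnt = dp(n - (3 * num))
--                 arr.append((turn+1, cnt))
--
--         arr.sort(key=lambda x: (x[0], -x[1]))
--
--         cost[n] = arr[0]
--         return cost[n]
--
--     return list(dp(target))
-- ===== SOURCE B (Python) =====
-- def solution(target):
--     moves = [(50, 1)]
--     for num in range(1, 21):
--         moves += [(num, 1), (2 * num, 0), (3 * num, 0)]
--     window = [(0, 0)]  # dp values of the last at-most-60 totals, ending at the current one
--     for n in range(1, target + 1):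
--         best = min(((window[-m][0] + 1, window[-m][1] + inc)
--                     for m, inc in moves if m <= n),
--                    key=lambda x: (x[0], -x[1]))
--         window = (window + [best])[-60:]
--     return list(window[-1])
-- ===== Notes on version B (the rewrite author's own statement) =====
-- stated objective: simpler
-- what changed: Replaces the memoized top-down recursion (nested dp closure, memo dict, per-value sort of candidates to take arr[0]) with a bottom-up sliding-window DP: iterate n = 1..target keeping only as many recent dp values as the largest move needs, and pick each entry with Python's tuple-key min over a precomputed move list.
-- outside the precondition, e.g. on solution(-1): A raises IndexError, B returns [0, 0]
import Mathlib
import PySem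

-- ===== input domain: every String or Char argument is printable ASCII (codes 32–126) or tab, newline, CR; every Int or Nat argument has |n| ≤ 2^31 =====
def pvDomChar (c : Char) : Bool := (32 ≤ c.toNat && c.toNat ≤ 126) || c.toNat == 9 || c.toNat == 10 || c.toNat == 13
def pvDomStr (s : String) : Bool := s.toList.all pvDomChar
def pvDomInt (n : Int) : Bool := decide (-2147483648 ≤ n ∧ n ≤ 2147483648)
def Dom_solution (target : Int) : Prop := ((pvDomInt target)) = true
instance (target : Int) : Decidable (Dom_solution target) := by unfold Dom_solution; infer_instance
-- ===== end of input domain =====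

-- B replaces A's memoized top-down recursion by a bottom-up sliding-window DP (simpler, no
-- recursion, O(1) table); return values agree on every target ≥ 0 (A raises IndexError on
-- negative targets).

-- ===== PORT A =====
-- candi = [i for i in range(1, 21)]
def candiA : List Int := PySem.List.pyRange 1 21 1

-- body of A's 'for num in candi' loop: threads (arr, cost); 'rec' is the recursive dp call
def dpAStep (rec : Int → Std.HashMap Int (Int × Int) → (Int × Int) × Std.HashMap Int (Int × Int))
    (n : Int) (acc : List (Int × Int) × Std.HashMap Int (Int × Int)) (num : Int) :
    List (Int × Int) × Std.HashMap Int (Int × Int) :=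
  let acc1 := if 0 ≤ n - num then
      let r := rec (n - num) acc.2
      (acc.1 ++ [(r.1.1 + 1, r.1.2 + 1)], r.2)
    else acc
  let acc2 := if 0 ≤ n - 2 * num then
      let r := rec (n - 2 * num) acc1.2
      (acc1.1 ++ [(r.1.1 + 1, r.1.2)], r.2)
    else acc1
  if 0 ≤ n - 3 * num then
      let r := rec (n - 3 * num) acc2.2
      (acc2.1 ++ [(r.1.1 + 1, r.1.2)], r.2)
  else acc2

-- A's inner dp(n), with the memo dict 'cost' threaded (cost is only keyed-lookup/assigned,
-- never iterated, so it is ported as the hash map Python's dict is; fuel only makes the recursion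
-- structural (solution supplies fuel > n, so the 0-fuel branch is never reached there).
-- 'arr[0]' is head!; Python raises IndexError on empty arr, which happens only for n < 0 (outside Pre_).
def dpA : Nat → Int → Std.HashMap Int (Int × Int) → (Int × Int) × Std.HashMap Int (Int × Int)
  | 0, _, cost => ((0, 0), cost)
  | fuel + 1, n, cost =>
    if n = 0 then ((0, 0), cost)
    else
      match cost[n]? with
      | some v => (v, cost)
      | none =>
        let s0 := if 0 ≤ n - 50 then
            let r := dpA fuel (n - 50) cost
            ([(r.1.1 + 1, r.1.2 + 1)], r.2)
          else ([], cost)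
        let s := candiA.foldl (dpAStep (dpA fuel) n) s0
        let best := (PySem.List.sorted2 s.1 (fun x => x.1) (fun x => -x.2)).head!
        (best, s.2.insert n best)

def solution (target : Int) : List Int :=
  let r := dpA (target.toNat + 1) target ∅
  [r.1.1, r.1.2]

-- ===== PORT B =====
-- moves = [(50,1)] + [(num,1),(2num,0),(3num,0) for num in 1..20]
def movesB : List (Int × Int) :=
  (PySem.List.pyRange 1 21 1).foldl
    (fun ms num => ms ++ [(num, 1), (2 * num, 0), (3 * num, 0)]) [(50, 1)]

-- one iteration of B's 'for n in range(1, target+1)' loop: best candidate from the window,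
-- then window = (window + [best])[-60:].  min(...) on an empty candidate list would raise in
-- Python; for n ≥ 1 it is never empty, and window[-m] is in range under the m <= n guard
-- (the pyGetD/.getD defaults are never used inside Pre_).
def dpBStep (window : List (Int × Int)) (n : Int) : List (Int × Int) :=
  let best := (PySem.List.min2?
      ((movesB.filter (fun m => m.1 ≤ n)).map
        (fun m => ((PySem.List.pyGetD window (-m.1) (0, 0)).1 + 1,
                   (PySem.List.pyGetD window (-m.1) (0, 0)).2 + m.2)))
      (fun x => x.1) (fun x => -x.2)).getD (0, 0)
  PySem.List.slice (window ++ [best]) (some (-60)) none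

def solution_alt (target : Int) : List Int :=
  let window := (PySem.List.pyRange 1 (target + 1) 1).foldl dpBStep [(0, 0)]
  let r := PySem.List.pyGetD window (-1) (0, 0)  -- window[-1]; window is never empty
  [r.1, r.2]

-- ===== PRECONDITION & SPEC =====
-- Pre_ excludes negative targets, on which Python A raises IndexError (arr is empty there).
def Pre_solution (target : Int) : Prop := 0 ≤ target
instance (target : Int) : Decidable (Pre_solution target) := by unfold Pre_solution; infer_instance
def pvWitness_solution : Int := 7

def Spec_solution (target : Int) (out : List Int) : Prop := out = solution_alt target
instance (target : Int) (out : List Int) : Decidable (Spec_solution target out) := by unfold Spec_solution; infer_instance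

-- ===== CLAIM (what is proved, stated in full; the proofs are below) =====
def Claim_equal_solution : Prop := ∀ (target : Int), Dom_solution target → Pre_solution target → Spec_solution target (solution target)

-- ===== LEMMAS AND PROOFS =====

-- positivity of all move sizes (used for termination and index bounds)
theorem movesB_pos : ∀ p ∈ movesB, 1 ≤ p.1 := by decide

theorem movesB_le60 : ∀ p ∈ movesB, p.1 ≤ 60 := by decide

-- the common value both programs compute: fI n = optimal (turns, counts) pair for n
def fI (n : Int) : Int × Int :=
  if n ≤ 0 then (0, 0)
  else
    (PySem.List.min2?
      ((movesB.filter (fun m => m.1 ≤ n)).attach.map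
        (fun m => ((fI (n - m.1.1)).1 + 1, (fI (n - m.1.1)).2 + m.1.2)))
      (fun x => x.1) (fun x => -x.2)).getD (0, 0)
termination_by n.toNat
decreasing_by
  have h1 := movesB_pos m.1 (List.mem_of_mem_filter m.2)
  omega

-- the candidate list both programs build at n
def candsI (n : Int) : List (Int × Int) :=
  (movesB.filter (fun m => m.1 ≤ n)).map
    (fun m => ((fI (n - m.1)).1 + 1, (fI (n - m.1)).2 + m.2))

theorem fI_nonpos {n : Int} (h : n ≤ 0) : fI n = (0, 0) := by
  rw [fI]; simp [h]

theorem fI_pos {n : Int} (h : 1 ≤ n) :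
    fI n = (PySem.List.min2? (candsI n) (fun x => x.1) (fun x => -x.2)).getD (0, 0) := by
  rw [fI]
  rw [if_neg (by omega)]
  rw [List.attach_map_val (l := movesB.filter (fun m => m.1 ≤ n))
    (f := fun m => ((fI (n - m.1)).1 + 1, (fI (n - m.1)).2 + m.2))]
  rfl

theorem candsI_ne_nil {n : Int} (h : 1 ≤ n) : candsI n ≠ [] := by
  have hm : ((1 : Int), (1 : Int)) ∈ movesB.filter (fun m => m.1 ≤ n) := by
    refine List.mem_filter.mpr ⟨by decide, by simpa using h⟩
  unfold candsI
  simp only [ne_eq, List.map_eq_nil_iff]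
  exact List.ne_nil_of_mem hm

-- head of Python's stable sort = Python's min (same first-minimal element), generic
theorem head?_insertBy {α : Type} (before : α → α → Bool) (x : α) (acc : List α) :
    (PySem.List.insertBy before x acc).head? =
      some (match acc.head? with
            | none => x
            | some m => if before x m then x else m) := by
  cases acc with
  | nil => simp [PySem.List.insertBy]
  | cons y ys =>
    simp only [PySem.List.insertBy, List.head?_cons]
    split <;> simp_all

theorem head?_foldl_insertBy {α : Type} (before : α → α → Bool) :
    ∀ (xs acc : List α),
      (xs.foldl (fun acc x => PySem.List.insertBy before x acc) acc).head? =
        xs.foldl (fun o x =>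
          match o with
          | none => some x
          | some m => if before x m then some x else some m) acc.head? := by
  intro xs
  induction xs with
  | nil => intro acc; rfl
  | cons x t ih =>
    intro acc
    simp only [List.foldl_cons]
    rw [ih (PySem.List.insertBy before x acc), head?_insertBy]
    cases acc with
    | nil => rfl
    | cons y ys =>
      simp only [List.head?_cons]
      by_cases hb : before x y <;> simp [hb]

theorem sorted2_head?_eq_min2? {α : Type} (xs : List α) (k1 k2 : α → Int) :
    (PySem.List.sorted2 xs k1 k2).head? = PySem.List.min2? xs k1 k2 :=
  head?_foldl_insertBy
    (fun a b => decide (k1 a < k1 b) || (!decide (k1 b < k1 a) && decide (k2 a < k2 b))) xs []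

theorem sorted2_head!_eq_min2?_getD {α : Type} [Inhabited α] (xs : List α) (k1 k2 : α → Int)
    (h : xs ≠ []) (d : α) :
    (PySem.List.sorted2 xs k1 k2).head! = (PySem.List.min2? xs k1 k2).getD d := by
  have hp := PySem.List.sorted2_perm xs k1 k2 false
  have hh := sorted2_head?_eq_min2? xs k1 k2
  cases hs : PySem.List.sorted2 xs k1 k2 with
  | nil => rw [hs] at hp; exact absurd (List.Perm.nil_eq hp).symm h
  | cons a t => rw [hs] at hh; simp [← hh, List.head!]

-- memo-dict invariant: every stored value is the true dp value
def InvD (cost : Std.HashMap Int (Int × Int)) : Prop :=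
  ∀ k v, cost[k]? = some v → v = fI k

-- one num-iteration of A's loop produces exactly the filtered candidates for that num
theorem dpAStep_eq (fuel : Nat) (n num : Int) (arr : List (Int × Int))
    (cost : Std.HashMap Int (Int × Int)) (hnum : 1 ≤ num) (hn1 : 1 ≤ n) (hfe : n.toNat ≤ fuel)
    (IH : ∀ m cost, 0 ≤ m → m.toNat < fuel → InvD cost →
      (dpA fuel m cost).1 = fI m ∧ InvD (dpA fuel m cost).2)
    (hInv : InvD cost) :
    (dpAStep (dpA fuel) n (arr, cost) num).1 =
        arr ++ ([((num : Int), (1 : Int)), (2 * num, 0), (3 * num, 0)].filter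
            (fun m => m.1 ≤ n)).map
          (fun m => ((fI (n - m.1)).1 + 1, (fI (n - m.1)).2 + m.2)) ∧
      InvD (dpAStep (dpA fuel) n (arr, cost) num).2 := by
  by_cases hc1 : num ≤ n
  · by_cases hc2 : 2 * num ≤ n
    · by_cases hc3 : 3 * num ≤ n
      · obtain ⟨h1, hI1⟩ := IH (n - num) cost (by omega) (by omega) hInv
        obtain ⟨h2, hI2⟩ := IH (n - 2 * num) (dpA fuel (n - num) cost).2 (by omega) (by omega) hI1
        obtain ⟨h3, hI3⟩ := IH (n - 3 * num)
          (dpA fuel (n - 2 * num) (dpA fuel (n - num) cost).2).2 (by omega) (by omega) hI2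
        refine ⟨?_, ?_⟩
        · simp [dpAStep, hc1, hc2, hc3, h1, h2, h3, List.filter]
        · simpa [dpAStep, hc1, hc2, hc3] using hI3
      · obtain ⟨h1, hI1⟩ := IH (n - num) cost (by omega) (by omega) hInv
        obtain ⟨h2, hI2⟩ := IH (n - 2 * num) (dpA fuel (n - num) cost).2 (by omega) (by omega) hI1
        refine ⟨?_, ?_⟩
        · simp [dpAStep, hc1, hc2, hc3, h1, h2, List.filter]
        · simpa [dpAStep, hc1, hc2, hc3] using hI2
    · have hc3 : ¬ 3 * num ≤ n := by omega
      obtain ⟨h1, hI1⟩ := IH (n - num) cost (by omega) (by omega) hInv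
      refine ⟨?_, ?_⟩
      · simp [dpAStep, hc1, hc2, hc3, h1, List.filter]
      · simpa [dpAStep, hc1, hc2, hc3] using hI1
  · have hc2 : ¬ 2 * num ≤ n := by omega
    have hc3 : ¬ 3 * num ≤ n := by omega
    refine ⟨?_, ?_⟩
    · simp [dpAStep, hc1, hc2, hc3, List.filter]
    · simpa [dpAStep, hc1, hc2, hc3] using hInv

-- A's whole candi loop builds arr ++ (candidates of all nums) and keeps the invariant
theorem dpA_loop (fuel : Nat) (n : Int) (hn1 : 1 ≤ n) (hfe : n.toNat ≤ fuel)
    (IH : ∀ m cost, 0 ≤ m → m.toNat < fuel → InvD cost →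
      (dpA fuel m cost).1 = fI m ∧ InvD (dpA fuel m cost).2) :
    ∀ (nums : List Int) (arr : List (Int × Int)) (cost : Std.HashMap Int (Int × Int)),
      (∀ x ∈ nums, 1 ≤ x) → InvD cost →
      (nums.foldl (dpAStep (dpA fuel) n) (arr, cost)).1 =
          arr ++ nums.flatMap (fun num =>
            ([((num : Int), (1 : Int)), (2 * num, 0), (3 * num, 0)].filter
                (fun m => m.1 ≤ n)).map
              (fun m => ((fI (n - m.1)).1 + 1, (fI (n - m.1)).2 + m.2))) ∧
        InvD (nums.foldl (dpAStep (dpA fuel) n) (arr, cost)).2 := by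
  intro nums
  induction nums with
  | nil => intro arr cost _ hInv; exact ⟨by simp, hInv⟩
  | cons num rest ih =>
    intro arr cost hall hInv
    obtain ⟨hs1, hs2⟩ := dpAStep_eq fuel n num arr cost (hall num (by simp)) hn1 hfe IH hInv
    simp only [List.foldl_cons]
    rw [show dpAStep (dpA fuel) n (arr, cost) num =
      ((dpAStep (dpA fuel) n (arr, cost) num).1, (dpAStep (dpA fuel) n (arr, cost) num).2) from rfl,
      hs1]
    obtain ⟨h1, h2⟩ := ih _ (dpAStep (dpA fuel) n (arr, cost) num).2
      (fun x hx => hall x (by simp [hx])) hs2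
    refine ⟨?_, h2⟩
    rw [h1]
    simp [List.flatMap_cons]

theorem movesB_decomp :
    movesB = (50, 1) :: candiA.flatMap (fun num => [(num, 1), (2 * num, 0), (3 * num, 0)]) := by
  decide

-- the full candidate list splits into the '50' candidate and the per-num triples
theorem candsI_eq (n : Int) :
    candsI n =
      (if (50 : Int) ≤ n then [((fI (n - 50)).1 + 1, (fI (n - 50)).2 + 1)] else []) ++
        candiA.flatMap (fun num =>
          ([((num : Int), (1 : Int)), (2 * num, 0), (3 * num, 0)].filter (fun m => m.1 ≤ n)).map
            (fun m => ((fI (n - m.1)).1 + 1, (fI (n - m.1)).2 + m.2))) := by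
  unfold candsI
  rw [movesB_decomp, List.filter_cons]
  by_cases h : (50 : Int) ≤ n <;>
    simp [h, List.filter_flatMap, List.map_flatMap]

theorem dpA_correct : ∀ (fuel : Nat) (n : Int) (cost : Std.HashMap Int (Int × Int)),
    0 ≤ n → n.toNat < fuel → InvD cost →
    (dpA fuel n cost).1 = fI n ∧ InvD (dpA fuel n cost).2 := by
  intro fuel
  induction fuel with
  | zero => intro n cost h0 hf; omega
  | succ fuel ih =>
    intro n cost h0 hf hInv
    by_cases hn0 : n = 0
    · subst hn0
      exact ⟨by simp [dpA, fI_nonpos le_rfl], by simpa [dpA] using hInv⟩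
    · have hn1 : 1 ≤ n := by omega
      cases hg : cost[n]? with
      | some v =>
        exact ⟨by simp [dpA, hn0, hg, hInv n v hg], by simpa [dpA, hn0, hg] using hInv⟩
      | none =>
        have hall : ∀ x ∈ candiA, (1 : Int) ≤ x := by decide
        by_cases h50 : (0 : Int) ≤ n - 50
        · obtain ⟨ha, hIa⟩ := ih (n - 50) cost (by omega) (by omega) hInv
          obtain ⟨hl1, hl2⟩ := dpA_loop fuel n hn1 (by omega) ih candiA
            [((dpA fuel (n - 50) cost).1.1 + 1, (dpA fuel (n - 50) cost).1.2 + 1)]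
            (dpA fuel (n - 50) cost).2 hall hIa
          have hcands : (candiA.foldl (dpAStep (dpA fuel) n)
              ([((dpA fuel (n - 50) cost).1.1 + 1, (dpA fuel (n - 50) cost).1.2 + 1)],
                (dpA fuel (n - 50) cost).2)).1 = candsI n := by
            rw [hl1, candsI_eq n, if_pos (by omega : (50 : Int) ≤ n), ha]
          have hbest : (PySem.List.sorted2 (candsI n) (fun x => x.1) (fun x => -x.2)).head! = fI n := by
            rw [sorted2_head!_eq_min2?_getD _ _ _ (candsI_ne_nil hn1) ((0 : Int), (0 : Int)),
              ← fI_pos hn1]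
          refine ⟨?_, ?_⟩
          · simp only [dpA, if_neg hn0, hg]
            rw [if_pos h50, hcands, hbest]
          · intro k v hkv
            simp only [dpA, if_neg hn0, hg] at hkv
            rw [if_pos h50, hcands, hbest] at hkv
            by_cases hk : k = n
            · subst hk
              rw [Std.HashMap.getElem?_insert] at hkv
              simp at hkv
              simp [hkv]
            · rw [Std.HashMap.getElem?_insert] at hkv
              rw [if_neg (by simpa using (Ne.symm hk))] at hkv
              exact hl2 k v hkv
        · obtain ⟨hl1, hl2⟩ := dpA_loop fuel n hn1 (by omega) ih candiA [] cost hall hInv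
          have hcands : (candiA.foldl (dpAStep (dpA fuel) n) ([], cost)).1 = candsI n := by
            rw [hl1, candsI_eq n, if_neg (by omega : ¬ (50 : Int) ≤ n)]
          have hbest : (PySem.List.sorted2 (candsI n) (fun x => x.1) (fun x => -x.2)).head! = fI n := by
            rw [sorted2_head!_eq_min2?_getD _ _ _ (candsI_ne_nil hn1) ((0 : Int), (0 : Int)),
              ← fI_pos hn1]
          refine ⟨?_, ?_⟩
          · simp only [dpA, if_neg hn0, hg]
            rw [if_neg h50, hcands, hbest]
          · intro k v hkv
            simp only [dpA, if_neg hn0, hg] at hkv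
            rw [if_neg h50, hcands, hbest] at hkv
            by_cases hk : k = n
            · subst hk
              rw [Std.HashMap.getElem?_insert] at hkv
              simp at hkv
              simp [hkv]
            · rw [Std.HashMap.getElem?_insert] at hkv
              rw [if_neg (by simpa using (Ne.symm hk))] at hkv
              exact hl2 k v hkv

-- B's window after step t holds fI of the last (at most 60) totals
theorem window_get (t k : Nat) (hk1 : 1 ≤ k) (hkt : k ≤ t + 1) (hk60 : k ≤ 60) :
    PySem.List.pyGetD (((PySem.List.pyRange 0 ((t : Int) + 1) 1).map fI).drop (t + 1 - 60))
      (-(k : Int)) (0, 0) = fI ((t : Int) + 1 - (k : Int)) := by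
  have hlenfull : ((PySem.List.pyRange 0 ((t : Int) + 1) 1).map fI).length = t + 1 := by
    rw [List.length_map, PySem.List.length_pyRange_one]
    omega
  have hkle : k ≤ (((PySem.List.pyRange 0 ((t : Int) + 1) 1).map fI).drop (t + 1 - 60)).length := by
    rw [List.length_drop, hlenfull]
    omega
  rw [PySem.List.pyGetD_neg_natCast _ _ _ hk1 hkle]
  rw [List.getElem_drop, List.getElem_map, PySem.List.getElem_pyRange_one]
  congr 1
  simp only [List.length_drop, hlenfull]
  omega

theorem buildB : ∀ (t : Nat),
    (PySem.List.pyRange 1 ((t : Int) + 1) 1).foldl dpBStep [((0 : Int), (0 : Int))] =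
      ((PySem.List.pyRange 0 ((t : Int) + 1) 1).map fI).drop (t + 1 - 60) := by
  intro t
  induction t with
  | zero =>
    rw [PySem.List.pyRange_one_eq_nil (by norm_num), show ((0 : Nat) : Int) + 1 = 0 + 1 by norm_num,
      PySem.List.pyRange_one_singleton]
    simp [fI_nonpos le_rfl]
  | succ t ih =>
    have hc : ((t + 1 : Nat) : Int) + 1 = ((t : Int) + 1) + 1 := by push_cast; ring
    rw [hc, PySem.List.pyRange_one_succ_right (show (1 : Int) ≤ (t : Int) + 1 by omega),
      List.foldl_append, ih]
    simp only [List.foldl_cons, List.foldl_nil]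
    unfold dpBStep
    have hcand : (movesB.filter (fun m => m.1 ≤ (t : Int) + 1)).map
        (fun m => ((PySem.List.pyGetD
                      (((PySem.List.pyRange 0 ((t : Int) + 1) 1).map fI).drop (t + 1 - 60))
                      (-m.1) (0, 0)).1 + 1,
                   (PySem.List.pyGetD
                      (((PySem.List.pyRange 0 ((t : Int) + 1) 1).map fI).drop (t + 1 - 60))
                      (-m.1) (0, 0)).2 + m.2)) = candsI ((t : Int) + 1) := by
      apply List.map_congr_left
      intro m hm
      have hle : m.1 ≤ (t : Int) + 1 := by simpa using (List.mem_filter.mp hm).2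
      have hpos := movesB_pos m (List.mem_of_mem_filter hm)
      have h60 := movesB_le60 m (List.mem_of_mem_filter hm)
      have hw : PySem.List.pyGetD
          (((PySem.List.pyRange 0 ((t : Int) + 1) 1).map fI).drop (t + 1 - 60))
          (-m.1) (0, 0) = fI ((t : Int) + 1 - m.1) := by
        have h := window_get t m.1.toNat (by omega) (by omega) (by omega)
        rw [show ((m.1.toNat : Nat) : Int) = m.1 by omega] at h
        exact h
      rw [hw]
    rw [hcand, ← fI_pos (by omega : (1 : Int) ≤ (t : Int) + 1)]
    rw [PySem.List.slice_from_neg_ofNat _ 60 (by norm_num)]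
    have hlenfull : ((PySem.List.pyRange 0 ((t : Int) + 1) 1).map fI).length = t + 1 := by
      rw [List.length_map, PySem.List.length_pyRange_one]
      omega
    have hle60 : t + 1 - 60 ≤ ((PySem.List.pyRange 0 ((t : Int) + 1) 1).map fI).length := by
      rw [hlenfull]
      omega
    rw [← List.drop_append_of_le_length hle60]
    rw [show ((PySem.List.pyRange 0 ((t : Int) + 1) 1).map fI) ++ [fI ((t : Int) + 1)]
        = (PySem.List.pyRange 0 (((t : Int) + 1) + 1) 1).map fI by
      rw [PySem.List.pyRange_one_succ_right (show (0 : Int) ≤ (t : Int) + 1 by omega),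
        List.map_append]
      simp]
    rw [List.drop_drop]
    have hidx : t + 1 - 60 +
        ((List.drop (t + 1 - 60) ((PySem.List.pyRange 0 ((t : Int) + 1 + 1) 1).map fI)).length - 60)
        = t + 1 + 1 - 60 := by
      rw [List.length_drop, List.length_map, PySem.List.length_pyRange_one]
      omega
    rw [hidx]

-- ===== VERDICT (by name: the statement is the Claim_ definition above) =====
theorem solution_spec : Claim_equal_solution := by
  intro target _ hpre
  unfold Spec_solution solution solution_alt
  have hA := (dpA_correct (target.toNat + 1) target ∅ hpre (by omega)
    (fun k v hkv => by simp at hkv)).1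
  have hB := buildB target.toNat
  rw [Int.toNat_of_nonneg hpre] at hB
  have hW := window_get target.toNat 1 le_rfl (by omega) (by omega)
  rw [Int.toNat_of_nonneg hpre] at hW
  simp only [Nat.cast_one] at hW
  simp only [hA, hB, hW, add_sub_cancel_right]
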